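-- pv_equiv track=rewrite | github.com/ilialecha/Programming_1 | Lists/List_2/casino.py | buy_tokens
-- ===== SOURCE A (Python) =====
-- def buy_tokens(n):
-- 	'''
-- 	>>> buy_tokens(20)
-- 	(0, 5)
-- 	>>> buy_tokens(50)
-- 	(6, 2)
-- 	>>> buy_tokens(39)
-- 	(5, 1)
-- 	'''
--
-- 	'''Fichas rojas iniciales'''
-- 	number_red = n//7
--
-- 	'''Sobrante de las fichas rojas'''
-- 	rest = n%7
--
-- 	'''Mientras el restante de las fichas rojas NO sea divisible entre 4:'''
-- 	while rest % 4 != 0: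
-- 		'''Restamos 1 ficha roja'''
-- 		number_red -= 1
--
-- 		'''Al haber restado una ficha roja, sumamos el valor de una (7 euros) al resto'''
-- 		rest += 7
--
--
-- 	return number_red, rest//4
-- ===== SOURCE B (Python) =====
-- def buy_tokens(n):
--     red = n // 7
--     rest = n % 7
--     k = rest % 4
--     return red - k, (rest + 7 * k) // 4
-- ===== Notes on version B (the rewrite author's own statement) =====
-- stated objective: simpler
-- what changed: Replaces the decrement-until-divisible while loop with a direct closed-form modular-arithmetic computation of how many red tokens the loop removes; no loop remains.
import Mathlib
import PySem

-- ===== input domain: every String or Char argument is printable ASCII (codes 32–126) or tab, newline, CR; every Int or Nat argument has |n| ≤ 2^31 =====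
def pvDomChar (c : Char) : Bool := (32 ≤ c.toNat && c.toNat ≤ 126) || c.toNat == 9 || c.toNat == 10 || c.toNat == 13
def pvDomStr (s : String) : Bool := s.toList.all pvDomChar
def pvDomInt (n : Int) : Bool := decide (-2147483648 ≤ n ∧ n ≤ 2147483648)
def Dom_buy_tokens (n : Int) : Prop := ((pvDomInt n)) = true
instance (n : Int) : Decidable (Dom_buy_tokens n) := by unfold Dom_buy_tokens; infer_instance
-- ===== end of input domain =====

-- B replaces A's decrement-until-divisible while loop by the closed form k = (n%7)%4; objective: simpler.

-- ===== PORT A =====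
-- A's while loop; it runs at most 3 times since rest = n%7 ∈ [0,7), so fuel 4 is always enough
-- (the fuel only makes the same computation total).
def buyLoopA : Nat → Int → Int → Int × Int
  | 0, red, rest => (red, PySem.Int.floordiv rest 4)
  | Nat.succ f, red, rest =>
      if PySem.Int.mod rest 4 ≠ 0 then buyLoopA f (red - 1) (rest + 7)
      else (red, PySem.Int.floordiv rest 4)

def buy_tokens (n : Int) : Int × Int :=
  buyLoopA 4 (PySem.Int.floordiv n 7) (PySem.Int.mod n 7)

-- ===== PORT B =====
def buy_tokens_alt (n : Int) : Int × Int :=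
  let red := PySem.Int.floordiv n 7
  let rest := PySem.Int.mod n 7
  let k := PySem.Int.mod rest 4
  (red - k, PySem.Int.floordiv (rest + 7 * k) 4)

-- ===== PRECONDITION & SPEC =====
def Spec_buy_tokens (n : Int) (out : Int × Int) : Prop := out = buy_tokens_alt n
instance (n : Int) (out : Int × Int) : Decidable (Spec_buy_tokens n out) := by unfold Spec_buy_tokens; infer_instance

-- ===== CLAIM (what is proved, stated in full; the proofs are below) =====
def Claim_equal_buy_tokens : Prop := ∀ (n : Int), Dom_buy_tokens n → Spec_buy_tokens n (buy_tokens n)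

-- ===== LEMMAS AND PROOFS =====

theorem buy_agree (n : Int) : buy_tokens n = buy_tokens_alt n := by
  have hmod : PySem.Int.mod n 7 = n % 7 := PySem.Int.mod_eq_emod_of_pos (by norm_num)
  have h0 : 0 ≤ n % 7 := Int.emod_nonneg n (by norm_num)
  have h7 : n % 7 < 7 := Int.emod_lt_of_pos n (by norm_num)
  have hcase : n % 7 = 0 ∨ n % 7 = 1 ∨ n % 7 = 2 ∨ n % 7 = 3 ∨
      n % 7 = 4 ∨ n % 7 = 5 ∨ n % 7 = 6 := by omega
  unfold buy_tokens buy_tokens_alt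
  rw [hmod]
  generalize PySem.Int.floordiv n 7 = r
  rcases hcase with h | h | h | h | h | h | h <;>
    rw [h] <;> norm_num [buyLoopA, PySem.Int.mod, PySem.Int.floordiv, Int.fmod, Int.fdiv] <;> omega

-- ===== VERDICT (by name: the statement is the Claim_ definition above) =====
theorem buy_tokens_spec : Claim_equal_buy_tokens := by
  intro n _
  unfold Spec_buy_tokens
  exact (buy_agree n)
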